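-- pv_equiv track=rewrite | github.com/gustavomarquezinho/python-edital-tjes | edital-tjes/scripts/price_register/outputs.py | get_only_numbers
-- ===== SOURCE A (Python) =====
-- def get_only_numbers(values):
--     numbers, index = [], 0
--
--     while index < len(values):
--         if values[index].isdigit():
--             begin = index
--
--             while (index + 1) < len(values) and values[index + 1].isdigit():
--                 index += 1
--
--             numbers.append(int(values[begin:index + 1]))
--
--         index += 1
--
--     numbers.sort()
--     return numbers
-- ===== SOURCE B (Python) =====
-- def get_only_numbers(values):
--     masked = ''.join(c if c.isdigit() else ' ' for c in values)
--     return sorted(int(token) for token in masked.split())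
-- ===== Notes on version B (the rewrite author's own statement) =====
-- stated objective: faster
-- what changed: Instead of walking indices with nested while loops, B masks every non-digit character to a space and lets str.split() extract the maximal digit runs, then parses and sorts them.
import Mathlib
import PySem

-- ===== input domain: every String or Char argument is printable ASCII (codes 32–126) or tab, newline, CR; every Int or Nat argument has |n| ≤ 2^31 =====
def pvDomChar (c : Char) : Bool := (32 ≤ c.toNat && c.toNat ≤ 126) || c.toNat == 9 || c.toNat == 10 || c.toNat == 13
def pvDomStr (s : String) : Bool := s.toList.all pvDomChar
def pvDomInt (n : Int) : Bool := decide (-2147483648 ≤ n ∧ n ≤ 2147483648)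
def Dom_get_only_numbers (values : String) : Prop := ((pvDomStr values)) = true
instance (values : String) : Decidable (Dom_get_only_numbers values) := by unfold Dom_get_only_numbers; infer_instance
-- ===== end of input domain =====

-- B replaces A's hand-written index walk (nested while loops) by two staged passes:
-- mask every non-digit character to a space, then str.split() extracts the digit runs; same cost, simpler.

-- ===== PORT A =====
-- inner while: advance index while values[index + 1] is a digit (short-circuit kept as nested if)
def pvInnerA (cs : List Char) (index : Nat) : Nat :=
  if h : index + 1 < cs.length then
    if PySem.Chars.isdigit (cs[index + 1]'h) then pvInnerA cs (index + 1) else index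
  else index
termination_by cs.length - index

lemma pvInnerA_ge (cs : List Char) (index : Nat) : index ≤ pvInnerA cs index := by
  induction index using pvInnerA.induct cs with
  | case1 x h hd ih => rw [pvInnerA, dif_pos h, if_pos hd]; omega
  | case2 x h hd => rw [pvInnerA, dif_pos h, if_neg hd]
  | case3 x h => rw [pvInnerA, dif_neg h]

lemma pvInnerA_lt (cs : List Char) (index : Nat) (h0 : index < cs.length) :
    pvInnerA cs index < cs.length := by
  induction index using pvInnerA.induct cs with
  | case1 x h hd ih => rw [pvInnerA, dif_pos h, if_pos hd]; exact ih h
  | case2 x h hd => rwa [pvInnerA, dif_pos h, if_neg hd]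
  | case3 x h => rwa [pvInnerA, dif_neg h]

-- outer while; numbers is the accumulator, at the end numbers.sort() then return numbers.
-- 'begin' is the loop's index at entry, so the appended slice is values[index:pvInnerA+1];
-- int() on it is ported as ofChars? .getD 0 — it never fails, the slice being ASCII digits.
def pvOuterA (cs : List Char) (index : Nat) (numbers : List Int) : List Int :=
  if h : index < cs.length then
    if PySem.Chars.isdigit cs[index] then
      pvOuterA cs (pvInnerA cs index + 1)
        (numbers ++ [(PySem.Int.ofChars?
          (PySem.List.slice cs (some (index : Int)) (some ((pvInnerA cs index : Int) + 1)))).getD 0])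
    else pvOuterA cs (index + 1) numbers
  else PySem.List.sorted numbers (fun x => x) false
termination_by cs.length - index
decreasing_by
  · have h1 := pvInnerA_ge cs index; have h2 := pvInnerA_lt cs index h; omega
  · omega

def get_only_numbers (values : String) : List Int :=
  pvOuterA values.toList 0 []

-- ===== PORT B =====
-- masked = ''.join(c if c.isdigit() else ' ' for c in values): a per-character map
def pvMask (cs : List Char) : List Char :=
  cs.map (fun c => if PySem.Chars.isdigit c then c else ' ')

-- sorted(int(token) for token in masked.split()); int() never fails, tokens being ASCII digit runs
def get_only_numbers_alt (values : String) : List Int :=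
  PySem.List.sorted
    ((PySem.Chars.split₀ (pvMask values.toList)).map
      (fun token => (PySem.Int.ofChars? token).getD 0))
    (fun x => x) false

-- ===== PRECONDITION & SPEC =====
def Spec_get_only_numbers (values : String) (out : List Int) : Prop := out = get_only_numbers_alt values
instance (values : String) (out : List Int) : Decidable (Spec_get_only_numbers values out) := by unfold Spec_get_only_numbers; infer_instance

-- ===== CLAIM (what is proved, stated in full; the proofs are below) =====
def Claim_equal_get_only_numbers : Prop := ∀ (values : String), Dom_get_only_numbers values → Spec_get_only_numbers values (get_only_numbers values)

-- ===== LEMMAS AND PROOFS =====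

lemma pvTakeWhile_take (p : Char → Bool) (l : List Char) :
    l.take (l.takeWhile p).length = l.takeWhile p := by
  induction l with
  | nil => rfl
  | cons c t ih =>
    cases hp : p c
    · simp [hp]
    · simp [hp, ih]

lemma pvTakeWhile_drop (p : Char → Bool) (l : List Char) :
    l.drop (l.takeWhile p).length = l.dropWhile p := by
  induction l with
  | nil => rfl
  | cons c t ih =>
    cases hp : p c
    · simp [hp]
    · simp [hp, ih]

-- the maximal digit runs of cs, in order
def pvTokens (cs : List Char) : List (List Char) :=
  match cs with
  | [] => []
  | c :: rest =>
    if PySem.Chars.isdigit c then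
      (c :: rest.takeWhile PySem.Chars.isdigit) :: pvTokens (rest.dropWhile PySem.Chars.isdigit)
    else pvTokens rest
termination_by cs.length
decreasing_by
  · simp only [List.length_cons]
    have := List.length_dropWhile_le PySem.Chars.isdigit rest
    omega
  · simp

-- the inner while ends at the last index of the digit run that follows position index
lemma pvInnerA_eq (cs : List Char) (index : Nat) :
    pvInnerA cs index =
      index + ((cs.drop (index + 1)).takeWhile PySem.Chars.isdigit).length := by
  induction index using pvInnerA.induct cs with
  | case1 x h hd ih =>
    rw [pvInnerA, dif_pos h, if_pos hd]
    rw [List.drop_eq_getElem_cons h, List.takeWhile_cons_of_pos hd, ih, List.length_cons]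
    omega
  | case2 x h hd =>
    rw [pvInnerA, dif_pos h, if_neg hd]
    rw [List.drop_eq_getElem_cons h, List.takeWhile_cons_of_neg (by simpa using hd)]
    simp
  | case3 x h =>
    rw [pvInnerA, dif_neg h, List.drop_eq_nil_of_le (by omega)]
    simp

-- loop invariant: the outer while returns sort(numbers ++ parsed tokens of the unscanned suffix)
lemma pvOuterA_eq (cs : List Char) (index : Nat) (numbers : List Int) :
    pvOuterA cs index numbers =
      PySem.List.sorted
        (numbers ++ (pvTokens (cs.drop index)).map (fun t => (PySem.Int.ofChars? t).getD 0))
        (fun x => x) false := by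
  induction index, numbers using pvOuterA.induct cs with
  | case1 index numbers h hd ih =>
    rw [pvOuterA, dif_pos h, if_pos hd, ih]
    have hj : pvInnerA cs index
        = index + ((cs.drop (index + 1)).takeWhile PySem.Chars.isdigit).length :=
      pvInnerA_eq cs index
    have hdrop : cs.drop index = cs[index] :: cs.drop (index + 1) := List.drop_eq_getElem_cons h
    have hslice : PySem.List.slice cs (some (index : Int)) (some ((pvInnerA cs index : Int) + 1))
        = cs[index] :: (cs.drop (index + 1)).takeWhile PySem.Chars.isdigit := by
      have hcast : ((pvInnerA cs index : Nat) : Int) + 1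
          = ((index : Nat) : Int)
            + ((((cs.drop (index + 1)).takeWhile PySem.Chars.isdigit).length + 1
                : Nat) : Int) := by
        rw [hj]; push_cast; ring
      rw [hcast, PySem.List.slice_natCast_add, hdrop, List.take_succ_cons,
        pvTakeWhile_take]
    have hd2 : cs.drop (pvInnerA cs index + 1)
        = (cs.drop (index + 1)).dropWhile PySem.Chars.isdigit := by
      rw [hj, show index + ((cs.drop (index + 1)).takeWhile PySem.Chars.isdigit).length + 1
          = (index + 1) + ((cs.drop (index + 1)).takeWhile PySem.Chars.isdigit).length from by
        omega]
      rw [← List.drop_drop, pvTakeWhile_drop]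
    rw [hslice, hd2, hdrop, pvTokens, if_pos hd]
    simp
  | case2 index numbers h hd ih =>
    rw [pvOuterA, dif_pos h, if_neg hd, ih, List.drop_eq_getElem_cons h,
      pvTokens, if_neg (by simpa using hd)]
  | case3 index numbers h =>
    rw [pvOuterA, dif_neg h, List.drop_eq_nil_of_le (by omega)]
    simp [pvTokens]

-- words as split₀.go produces them on a masked string: cur is the reversed partial run
def pvWords (cur : List Char) (cs : List Char) : List (List Char) :=
  match cs with
  | [] => if cur.isEmpty then [] else [cur.reverse]
  | c :: rest =>
    if PySem.Chars.isdigit c then pvWords (c :: cur) rest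
    else if cur.isEmpty then pvWords [] rest else cur.reverse :: pvWords [] rest

-- split₀.go over a masked list is pvWords (acc is appended reversed)
lemma pvGo_mask (cs cur acc) :
    PySem.Chars.split₀.go (pvMask cs) cur acc = acc.reverse ++ pvWords cur cs := by
  induction cs generalizing cur acc with
  | nil =>
    by_cases hc : cur.isEmpty
    · simp [pvMask, PySem.Chars.split₀.go, pvWords, hc]
    · simp [pvMask, PySem.Chars.split₀.go, pvWords, hc]
  | cons c rest ih =>
    by_cases hd : PySem.Chars.isdigit c
    · have hs : PySem.Chars.isspace c = false := by
        have h1 : ('0' : Char) ≤ c ∧ c ≤ '9' := by simpa [PySem.Chars.isdigit] using hd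
        have h2 : 48 ≤ c.toNat := h1.1
        have h3 : c.toNat ≤ 57 := h1.2
        simp only [PySem.Chars.isspace]
        simp only [Bool.or_eq_false_iff, Bool.and_eq_false_iff, decide_eq_false_iff_not]
        omega
      simp only [pvMask, List.map_cons, if_pos hd, PySem.Chars.split₀.go, hs,
        Bool.false_eq_true, if_false]
      rw [← pvMask, ih, pvWords, if_pos hd]
    · have hs : PySem.Chars.isspace ' ' = true := by decide
      by_cases hc : cur.isEmpty
      · simp only [pvMask, List.map_cons, if_neg hd, PySem.Chars.split₀.go, hs, if_true, hc]
        rw [← pvMask, ih, pvWords, if_neg hd, if_pos hc]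
      · simp only [pvMask, List.map_cons, if_neg hd, PySem.Chars.split₀.go, hs, if_true,
          if_neg hc]
        rw [← pvMask, ih, pvWords, if_neg hd, if_neg hc]
        simp

-- a nonempty partial run cur is completed by the digits ahead, then scanning resumes fresh
lemma pvWords_cur (cur cs : List Char) (h : cur ≠ []) :
    pvWords cur cs =
      (cur.reverse ++ cs.takeWhile PySem.Chars.isdigit) ::
        pvWords [] (cs.dropWhile PySem.Chars.isdigit) := by
  induction cs generalizing cur with
  | nil => simp [pvWords, h]
  | cons d rest ih =>
    by_cases hdd : PySem.Chars.isdigit d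
    · rw [pvWords, if_pos hdd, ih (d :: cur) (by simp),
        List.takeWhile_cons_of_pos hdd, List.dropWhile_cons_of_pos hdd]
      simp
    · rw [pvWords, if_neg hdd, if_neg (by simpa using h),
        List.takeWhile_cons_of_neg (by simpa using hdd),
        List.dropWhile_cons_of_neg (by simpa using hdd)]
      simp [pvWords, hdd]

-- with an empty partial run, the words are exactly the digit tokens
lemma pvWords_nil_eq_tokens (cs : List Char) : pvWords [] cs = pvTokens cs := by
  induction cs using pvTokens.induct with
  | case1 => simp [pvWords, pvTokens]
  | case2 c rest hd ih =>
    rw [pvWords, if_pos hd, pvWords_cur [c] rest (by simp), pvTokens, if_pos hd, ih]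
    simp
  | case3 c rest hd ih =>
    rw [pvTokens, if_neg hd, ← ih]
    simp [pvWords, hd]

-- ===== VERDICT (by name: the statement is the Claim_ definition above) =====
theorem get_only_numbers_spec : Claim_equal_get_only_numbers := by
  intro values _
  show get_only_numbers values = get_only_numbers_alt values
  rw [get_only_numbers, pvOuterA_eq, get_only_numbers_alt, PySem.Chars.split₀,
    pvGo_mask, pvWords_nil_eq_tokens]
  simp
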